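-- pv_equiv track=rewrite | github.com/Greek-Fire/ansible-election | filter_plugins/filters.py | election
-- ===== SOURCE A (Python) =====
-- from collections import Counter
--
-- def election(vote_list):
--     if len(vote_list) == 0:
--       return 'no update to report'
--
--     votes = Counter(vote_list)
--     dict = {}
--
--     for v in votes.values():
--       dict[v] = []
--
--     for (k,v) in votes.items():
--       dict[v].append(k)
--
--     total_votes = sorted(dict.keys(),reverse=True)[0]
--
--     if len(dict) == 1:
--       first = list(dict.items())[0][1]
--       x = ' '.join(first)
--     elif len(dict[total_votes]) > 1:
--       x = sorted(dict[total_votes])[0]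
--     else:
--       x = dict[total_votes][0]
--     return x
-- ===== SOURCE B (Python) =====
-- from collections import Counter
--
-- def election(vote_list):
--     if not vote_list:
--         return 'no update to report'
--     votes = Counter(vote_list)
--     mx = max(votes.values())
--     if min(votes.values()) == mx:
--         return ' '.join(votes)
--     return min(c for c in votes if votes[c] == mx)
-- ===== Notes on version B (the rewrite author's own statement) =====
-- stated objective: simpler
-- what changed: Drops the intermediate count->candidates bucket dict and its two build loops entirely: B reads max/min of the counter's values directly, joins the counter's keys in the all-tied case, and otherwise returns the lexicographic minimum of the max-count candidates.
import Mathlib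
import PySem

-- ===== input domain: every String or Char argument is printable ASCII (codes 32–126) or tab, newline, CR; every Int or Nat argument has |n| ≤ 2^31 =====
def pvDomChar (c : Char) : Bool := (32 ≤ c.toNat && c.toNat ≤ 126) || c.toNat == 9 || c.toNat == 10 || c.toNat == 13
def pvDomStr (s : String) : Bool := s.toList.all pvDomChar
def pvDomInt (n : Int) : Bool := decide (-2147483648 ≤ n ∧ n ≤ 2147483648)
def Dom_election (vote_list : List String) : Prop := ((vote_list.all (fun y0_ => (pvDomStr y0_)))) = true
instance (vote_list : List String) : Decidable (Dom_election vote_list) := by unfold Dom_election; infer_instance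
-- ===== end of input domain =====

-- B drops A's count->candidates bucket dict and its two build loops: it reads min/max of the counter's
-- values directly and picks the lexicographically smallest max-count candidate (objective: simpler).


-- ===== PORT A =====
def election (vote_list : List String) : String :=
  if vote_list.length = 0 then "no update to report"
  else
    let votes : PySem.Dict String Int := PySem.Dict.counter vote_list
    let dict0 : PySem.Dict Int (List String) :=
      votes.values.foldl (fun d v => d.insert v []) PySem.Dict.empty
    let dict1 : PySem.Dict Int (List String) :=
      votes.items.foldl (fun d kv => d.modify kv.2 [] (fun l => l ++ [kv.1])) dict0
    let total_votes : Int := (PySem.List.sorted dict1.keys (fun x => x) true).headD 0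
    if dict1.size = 1 then
      PySem.Str.join " " (dict1.items.headD (0, [])).2
    else if (dict1.getD total_votes []).length > 1 then
      (PySem.List.sorted (dict1.getD total_votes []) (fun x => x) false).headD ""
    else
      (dict1.getD total_votes []).headD ""

-- ===== PORT B =====
def election_alt (vote_list : List String) : String :=
  if vote_list.isEmpty then "no update to report"
  else
    let votes : PySem.Dict String Int := PySem.Dict.counter vote_list
    let mx : Int := (PySem.List.max? votes.values (fun x => x)).getD 0
    if (PySem.List.min? votes.values (fun x => x)).getD 0 = mx then
      PySem.Str.join " " votes.keys
    else
      (PySem.List.min? (votes.keys.filter (fun c => votes.getD c 0 == mx)) (fun x => x)).getD ""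

-- ===== PRECONDITION & SPEC =====
def Spec_election (vote_list : List String) (out : String) : Prop := out = election_alt vote_list
instance (vote_list : List String) (out : String) : Decidable (Spec_election vote_list out) := by unfold Spec_election; infer_instance

-- ===== CLAIM (what is proved, stated in full; the proofs are below) =====
def Claim_equal_election : Prop := ∀ (vote_list : List String), Dom_election vote_list → Spec_election vote_list (election vote_list)

-- ===== LEMMAS AND PROOFS =====

lemma getD_fold_insert_nil (l : List Int) (d : PySem.Dict Int (List String)) (c : Int)
    (h : d.getD c [] = []) :
    (l.foldl (fun d v => d.insert v []) d).getD c [] = [] := by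
  induction l generalizing d with
  | nil => exact h
  | cons v t ih =>
    apply ih
    rw [PySem.Dict.getD_insert]
    split_ifs <;> simp [h]

lemma ofList_all_eq {α : Type} [BEq α] [LawfulBEq α] (l : List α) (v : α)
    (hne : l ≠ []) (h : ∀ y ∈ l, y = v) : PySem.Set.ofList l = [v] := by
  induction l with
  | nil => exact absurd rfl hne
  | cons x t ih =>
    rw [PySem.Set.ofList_cons, h x (by simp)]
    by_cases ht : t = []
    · simp [ht, PySem.Set.ofList_nil, PySem.Set.discard]
    · rw [ih ht (fun y hy => h y (by simp [hy]))]
      simp [PySem.Set.discard]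

lemma sorted_headD_eq_min (w : List String) (hw : w ≠ []) :
    (PySem.List.sorted w (fun x => x) false).headD "" = (PySem.List.min? w (fun x => x)).getD "" := by
  obtain ⟨m, hm⟩ : ∃ m, PySem.List.min? w (fun x => x) = some m := by
    cases h : PySem.List.min? w (fun x => x) with
    | none => exact absurd ((PySem.List.min?_eq_none_iff w _).mp h) hw
    | some m => exact ⟨m, rfl⟩
  cases hs : PySem.List.sorted w (fun x => x) false with
  | nil => exact absurd ((PySem.List.sorted_eq_nil_iff w _ false).mp hs) hw
  | cons a t =>
    have ha : a ∈ w := (PySem.List.mem_sorted w _ false a).mp (by rw [hs]; simp)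
    have h1 : a ≤ m := PySem.List.key_head_sorted_le w _ hs m (PySem.List.min?_mem hm)
    have h2 : m ≤ a := PySem.List.min?_isMin hm a ha
    simp [hm, le_antisymm h1 h2]

lemma sorted_rev_headD_eq_max (l : List Int) (hl : l ≠ []) :
    (PySem.List.sorted (PySem.Set.ofList l) (fun x => x) true).headD 0 = (PySem.List.max? l (fun x => x)).getD 0 := by
  obtain ⟨m, hm⟩ : ∃ m, PySem.List.max? l (fun x => x) = some m := by
    cases h : PySem.List.max? l (fun x => x) with
    | none => exact absurd ((PySem.List.max?_eq_none_iff l _).mp h) hl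
    | some m => exact ⟨m, rfl⟩
  have hset : PySem.Set.ofList l ≠ [] := by
    cases l with
    | nil => exact absurd rfl hl
    | cons x t => rw [PySem.Set.ofList_cons]; simp
  cases hs : PySem.List.sorted (PySem.Set.ofList l) (fun x => x) true with
  | nil => exact absurd ((PySem.List.sorted_eq_nil_iff _ _ true).mp hs) hset
  | cons a t =>
    have ha : a ∈ l := (PySem.Set.mem_ofList l a).mp
      ((PySem.List.mem_sorted _ _ true a).mp (by rw [hs]; simp))
    have h1 : m ≤ a := PySem.List.key_head_sorted_rev_ge _ _ hs m
      ((PySem.Set.mem_ofList l m).mpr (PySem.List.max?_mem hm))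
    have h2 : a ≤ m := PySem.List.max?_isMax hm a ha
    simp [hm, le_antisymm h2 h1]


lemma election_eq_alt (xs : List String) : election xs = election_alt xs := by
  by_cases hxs : xs = []
  · simp [hxs, election, election_alt]
  · have h1 : ¬ (xs.length = 0) := by simpa using hxs
    have h2 : ¬ (xs.isEmpty = true) := by simpa [List.isEmpty_iff] using hxs
    rw [election, if_neg h1, election_alt, if_neg h2]
    set V := PySem.Dict.counter xs with hVdef
    set vals := V.values with hvalsdef
    set dict0 := vals.foldl (fun d v => d.insert v []) PySem.Dict.empty with hd0def
    set dict1 := V.items.foldl (fun d kv => d.modify kv.2 [] (fun l => l ++ [kv.1])) dict0 with hd1def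
    have hKeys : V.keys = PySem.Set.ofList xs := PySem.Dict.keys_counter xs
    have hItems : V.items = (PySem.Set.ofList xs).map (fun k => (k, (xs.count k : Int))) :=
      PySem.Dict.items_counter xs
    have hValsEq : vals = (PySem.Set.ofList xs).map (fun k => (xs.count k : Int)) := by
      rw [hvalsdef]
      show V.items.map (·.2) = _
      rw [hItems, List.map_map]
      rfl
    have hvalsne : vals ≠ [] := by
      rw [hValsEq]
      cases xs with
      | nil => exact absurd rfl hxs
      | cons x t => rw [PySem.Set.ofList_cons]; simp
    have hd0keys : dict0.keys = PySem.Set.ofList vals := by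
      have h := PySem.Dict.keys_foldl_insert vals (fun _ _ => ([] : List String)) PySem.Dict.empty
      rw [hd0def]
      exact h.trans (PySem.Set.update_empty vals)
    have hd1keys : dict1.keys = PySem.Set.ofList vals := by
      have h := PySem.Dict.keys_foldl_modify_key V.items (fun kv : String × Int => kv.2)
        ([] : List String) (fun _ kv l => l ++ [kv.1]) dict0
      rw [hd1def]
      refine Eq.trans h ?_
      have hmap : V.items.map (fun kv : String × Int => kv.2) = vals := rfl
      rw [hmap, hd0keys, PySem.Set.update_eq_append_filter]
      have hfil : List.filter (fun y => !(PySem.Set.ofList vals).contains y) (PySem.Set.ofList vals) = [] := by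
        rw [List.filter_eq_nil_iff]
        intro a ha
        have hav : a ∈ vals := (PySem.Set.mem_ofList _ _).mp ha
        simpa [PySem.Set.contains_eq_listContains] using hav
      rw [hfil, List.append_nil]
    have hnd : dict1.keys.Nodup := by rw [hd1keys]; exact PySem.Set.nodup_ofList vals
    have hsize : dict1.size = (PySem.Set.ofList vals).length := by
      rw [← hd1keys]
      show dict1.items.length = (dict1.items.map (·.1)).length
      rw [List.length_map]
    have hgetD : ∀ c, dict1.getD c [] =
        (PySem.Set.ofList xs).filter (fun k => ((xs.count k : Int) == c)) := by
      intro c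
      have h0 : dict0.getD c [] = [] := by
        rw [hd0def]
        exact getD_fold_insert_nil vals PySem.Dict.empty c (PySem.Dict.getD_empty c [])
      have hswap : dict1 = (V.items.map (fun p => (p.2, p.1))).foldl
          (fun d p => d.modify p.1 [] (fun l => l ++ [p.2])) dict0 := by
        rw [hd1def, List.foldl_map]
      rw [hswap, PySem.Dict.getD_foldl_modify_append, h0, List.nil_append, hItems,
        List.map_map, List.filter_map, List.map_map]
      simp [Function.comp_def]
    obtain ⟨M, hM⟩ : ∃ M, PySem.List.max? vals (fun x => x) = some M := by
      cases h : PySem.List.max? vals (fun x => x) with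
      | none => exact absurd ((PySem.List.max?_eq_none_iff vals _).mp h) hvalsne
      | some M => exact ⟨M, rfl⟩
    obtain ⟨m0, hm0⟩ : ∃ m0, PySem.List.min? vals (fun x => x) = some m0 := by
      cases h : PySem.List.min? vals (fun x => x) with
      | none => exact absurd ((PySem.List.min?_eq_none_iff vals _).mp h) hvalsne
      | some m0 => exact ⟨m0, rfl⟩
    have htv : (PySem.List.sorted dict1.keys (fun x => x) true).headD 0 =
        (PySem.List.max? vals (fun x => x)).getD 0 := by
      rw [hd1keys]; exact sorted_rev_headD_eq_max vals hvalsne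
    by_cases htie : (PySem.List.min? vals (fun x => x)).getD 0 = (PySem.List.max? vals (fun x => x)).getD 0
    · -- all counts equal
      have hmM : m0 = M := by simpa [hm0, hM] using htie
      have hall : ∀ y ∈ vals, y = M := fun y hy =>
        le_antisymm (PySem.List.max?_isMax hM y hy) (hmM ▸ PySem.List.min?_isMin hm0 y hy)
      have hset1 : PySem.Set.ofList vals = [M] := ofList_all_eq vals M hvalsne hall
      rw [if_pos htie, if_pos (by rw [hsize, hset1]; rfl)]
      have hitems1 : dict1.items = [(M, dict1.getD M [])] := by
        rw [PySem.Dict.items_eq_map_keys dict1 hnd [], hd1keys, hset1, List.map_singleton]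
      rw [hitems1]
      show PySem.Str.join " " (dict1.getD M []) = PySem.Str.join " " V.keys
      have hfull : dict1.getD M [] = PySem.Set.ofList xs := by
        rw [hgetD M, List.filter_eq_self]
        intro k hk
        have : (xs.count k : Int) ∈ vals := by
          rw [hValsEq]; exact List.mem_map.mpr ⟨k, hk, rfl⟩
        simp [hall _ this]
      rw [hfull, hKeys]
    · rw [if_neg htie]
      have hsizene : ¬ dict1.size = 1 := by
        rw [hsize]
        intro hlen
        obtain ⟨v, hv⟩ := List.length_eq_one_iff.mp hlen
        apply htie
        have hallv : ∀ y ∈ vals, y = v := fun y hy => by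
          have hmem : y ∈ PySem.Set.ofList vals := (PySem.Set.mem_ofList _ _).mpr hy
          rw [hv] at hmem; simpa using hmem
        rw [hm0, hM, hallv m0 (PySem.List.min?_mem hm0), hallv M (PySem.List.max?_mem hM)]
      rw [if_neg hsizene, htv]
      have hmxM : (PySem.List.max? vals (fun x => x)).getD 0 = M := by rw [hM]; rfl
      rw [hmxM]
      have hBlist : V.keys.filter (fun c => V.getD c 0 == M) = dict1.getD M [] := by
        rw [hgetD M, hKeys, hVdef]
        simp only [PySem.Dict.getD_counter]
      rw [hBlist]
      set w := dict1.getD M [] with hwdef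
      have hwne : w ≠ [] := by
        have hMmem : M ∈ vals := PySem.List.max?_mem hM
        rw [hValsEq] at hMmem
        obtain ⟨k, hk, hkM⟩ := List.mem_map.mp hMmem
        have hkw : k ∈ w := by
          rw [hwdef, hgetD M, List.mem_filter]
          exact ⟨hk, by simp [hkM]⟩
        exact fun h => by simp [h] at hkw
      by_cases hlen2 : w.length > 1
      · rw [if_pos hlen2, sorted_headD_eq_min w hwne]
      · rw [if_neg hlen2]
        have hw1 : w.length = 1 := by
          have hp : 0 < w.length := List.length_pos_iff.mpr hwne
          omega
        obtain ⟨a, ha⟩ := List.length_eq_one_iff.mp hw1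
        rw [ha, PySem.List.min?_id_cons]
        simp


-- ===== VERDICT (by name: the statement is the Claim_ definition above) =====
theorem election_spec : Claim_equal_election := by
  intro xs _
  unfold Spec_election
  exact election_eq_alt xs
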